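-- pv_equiv track=rewrite | github.com/CarambolaCup/RedvsBlue | policytest.py | player_situation_detect
-- ===== SOURCE A (Python) =====
-- ALLY = 0
--
-- ENEMY = 1
--
-- WALL = 2
--
-- def player_situation_detect(x, y, observation):
--     ATK = 10
--     DEF = 0
--     cpy_ally = 0
--     cpy_enemy = 0
--     for offset_x in range(-3, +3):
--         for offset_y in range(-3, +3):
--             if 0 <= x+offset_x and x+offset_x <= 8 and 0 <= y+offset_y and y+offset_y <= 8:
--                 if not (0 == offset_x and 0 == offset_y):
--                     if 1 == observation[x+offset_x][y+offset_y][ALLY]: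
--                         cpy_ally = cpy_ally+1
--                         ATK = ATK + 100 // (abs(offset_x)+abs(offset_y))
--                         DEF = DEF + 100 // (abs(offset_x)+abs(offset_y))
--                     elif 1 == observation[x+offset_x][y+offset_y][ENEMY]:
--                         cpy_enemy = cpy_enemy + 1
--                         DEF = DEF - 110 // (abs(offset_x)+abs(offset_y))
--                     elif 1 == observation[x+offset_x][y+offset_y][WALL]:
--                         ATK = ATK - 20 // (abs(offset_x)+abs(offset_y))
--                         DEF = DEF + 30 // (abs(offset_x)+abs(offset_y))
--     for offset_x in range(-3, +3):
--         for offset_y in range(-3, +3):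
--             if not (0 <= x+offset_x and x+offset_x <= 8 and 0 <= y+offset_y and y+offset_y <= 8):
--                 if cpy_ally > cpy_enemy:
--                     ATK = ATK + 25
--                 elif cpy_ally < cpy_enemy:
--                     DEF = DEF - 20
--     return (ATK, DEF)
-- ===== SOURCE B (Python) =====
-- ALLY = 0
--
-- ENEMY = 1
--
-- WALL = 2
--
-- def player_situation_detect(x, y, observation):
--     # Iterate directly over the clipped board rectangle (no bounds test per cell);
--     # the out-of-board effect of A's second sweep is applied in closed form from
--     # the rectangle's area.
--     xlo, xhi = max(0, x - 3), min(8, x + 2)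
--     ylo, yhi = max(0, y - 3), min(8, y + 2)
--     atk, dfs, ally, enemy = 10, 0, 0, 0
--     for i in range(xlo, xhi + 1):
--         for j in range(ylo, yhi + 1):
--             if i == x and j == y:
--                 continue
--             d = abs(i - x) + abs(j - y)
--             cell = observation[i][j]
--             if cell[ALLY] == 1:
--                 ally += 1
--                 atk += 100 // d
--                 dfs += 100 // d
--             elif cell[ENEMY] == 1:
--                 enemy += 1
--                 dfs -= 110 // d
--             elif cell[WALL] == 1:
--                 atk -= 20 // d
--                 dfs += 30 // d
--     oob = 36 - max(0, xhi - xlo + 1) * max(0, yhi - ylo + 1)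
--     if ally > enemy:
--         atk += 25 * oob
--     elif ally < enemy:
--         dfs -= 20 * oob
--     return (atk, dfs)
-- ===== Notes on version B (the rewrite author's own statement) =====
-- stated objective: alternative
-- what changed: Instead of sweeping the fixed 6x6 offset window twice with a per-cell bounds test, B iterates directly over the clipped board rectangle (computed once with max/min), so no bounds test is needed per cell, and applies A's whole second out-of-board sweep in closed form from the rectangle's area (25*oob / 20*oob).
import Mathlib
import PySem

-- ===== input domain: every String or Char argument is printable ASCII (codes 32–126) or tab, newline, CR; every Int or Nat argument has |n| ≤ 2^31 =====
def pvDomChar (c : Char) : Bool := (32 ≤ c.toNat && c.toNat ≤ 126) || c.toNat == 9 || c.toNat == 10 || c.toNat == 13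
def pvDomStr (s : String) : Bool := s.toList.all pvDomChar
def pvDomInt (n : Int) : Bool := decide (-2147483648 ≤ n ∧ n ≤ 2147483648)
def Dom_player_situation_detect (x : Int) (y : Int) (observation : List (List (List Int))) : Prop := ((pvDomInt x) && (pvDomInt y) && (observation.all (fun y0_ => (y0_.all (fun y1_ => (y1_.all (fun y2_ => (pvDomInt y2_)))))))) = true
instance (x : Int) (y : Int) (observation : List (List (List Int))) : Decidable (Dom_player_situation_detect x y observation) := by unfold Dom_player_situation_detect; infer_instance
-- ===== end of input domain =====

-- B walks the clipped board rectangle directly (no per-cell bounds test) and applies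
-- A's second out-of-board sweep in closed form from the rectangle's area; return value only.

-- ===== PORT A =====
-- one in-window step of A's first loop (body of the nested for)
def pvStepA1 (x y : Int) (observation : List (List (List Int)))
    (s : Int × Int × Int × Int) (ox oy : Int) : Int × Int × Int × Int :=
  if 0 ≤ x + ox ∧ x + ox ≤ 8 ∧ 0 ≤ y + oy ∧ y + oy ≤ 8 then
    if ¬(0 = ox ∧ 0 = oy) then
      let cell := ((PySem.List.pyGet? ((PySem.List.pyGet? observation (x + ox)).getD []) (y + oy))).getD []
      if (PySem.List.pyGet? cell 0).getD 0 = 1 then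
        (s.1 + PySem.Int.floordiv 100 (|ox| + |oy|),
         s.2.1 + PySem.Int.floordiv 100 (|ox| + |oy|), s.2.2.1 + 1, s.2.2.2)
      else if (PySem.List.pyGet? cell 1).getD 0 = 1 then
        (s.1, s.2.1 - PySem.Int.floordiv 110 (|ox| + |oy|), s.2.2.1, s.2.2.2 + 1)
      else if (PySem.List.pyGet? cell 2).getD 0 = 1 then
        (s.1 - PySem.Int.floordiv 20 (|ox| + |oy|),
         s.2.1 + PySem.Int.floordiv 30 (|ox| + |oy|), s.2.2.1, s.2.2.2)
      else s
    else s
  else s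

-- one step of A's second loop (ca, ce fixed after loop 1)
def pvStepA2 (x y ca ce : Int) (t : Int × Int) (ox oy : Int) : Int × Int :=
  if ¬(0 ≤ x + ox ∧ x + ox ≤ 8 ∧ 0 ≤ y + oy ∧ y + oy ≤ 8) then
    if ca > ce then (t.1 + 25, t.2)
    else if ca < ce then (t.1, t.2 - 20)
    else t
  else t

def player_situation_detect (x : Int) (y : Int) (observation : List (List (List Int))) : Int × Int :=
  let s := (PySem.List.pyRange (-3) 3 1).foldl (fun s ox =>
    (PySem.List.pyRange (-3) 3 1).foldl (fun s oy => pvStepA1 x y observation s ox oy) s)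
    ((10 : Int), (0 : Int), (0 : Int), (0 : Int))
  (PySem.List.pyRange (-3) 3 1).foldl (fun t ox =>
    (PySem.List.pyRange (-3) 3 1).foldl (fun t oy => pvStepA2 x y s.2.2.1 s.2.2.2 t ox oy) t)
    (s.1, s.2.1)

-- ===== PORT B =====
-- B's per-cell step on absolute board coordinates (the center cell is skipped)
def pvStepB (x y : Int) (observation : List (List (List Int)))
    (s : Int × Int × Int × Int) (i j : Int) : Int × Int × Int × Int :=
  if i = x ∧ j = y then s
  else
    let d := |i - x| + |j - y|
    let cell := ((PySem.List.pyGet? ((PySem.List.pyGet? observation i).getD []) j)).getD []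
    if (PySem.List.pyGet? cell 0).getD 0 = 1 then
      (s.1 + PySem.Int.floordiv 100 d, s.2.1 + PySem.Int.floordiv 100 d, s.2.2.1 + 1, s.2.2.2)
    else if (PySem.List.pyGet? cell 1).getD 0 = 1 then
      (s.1, s.2.1 - PySem.Int.floordiv 110 d, s.2.2.1, s.2.2.2 + 1)
    else if (PySem.List.pyGet? cell 2).getD 0 = 1 then
      (s.1 - PySem.Int.floordiv 20 d, s.2.1 + PySem.Int.floordiv 30 d, s.2.2.1, s.2.2.2)
    else s

def player_situation_detect_alt (x : Int) (y : Int) (observation : List (List (List Int))) : Int × Int :=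
  let xlo := max 0 (x - 3)
  let xhi := min 8 (x + 2)
  let ylo := max 0 (y - 3)
  let yhi := min 8 (y + 2)
  let s := (PySem.List.pyRange xlo (xhi + 1) 1).foldl (fun s i =>
    (PySem.List.pyRange ylo (yhi + 1) 1).foldl (fun s j => pvStepB x y observation s i j) s)
    ((10 : Int), (0 : Int), (0 : Int), (0 : Int))
  let oob := 36 - max 0 (xhi - xlo + 1) * max 0 (yhi - ylo + 1)
  if s.2.2.1 > s.2.2.2 then (s.1 + 25 * oob, s.2.1)
  else if s.2.2.1 < s.2.2.2 then (s.1, s.2.1 - 20 * oob)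
  else (s.1, s.2.1)

-- ===== PRECONDITION & SPEC =====
-- Pre_ excludes observations too small or too ragged in the scanned window, where the
-- Python A may raise IndexError (it also excludes cells shorter than the 3 channels the
-- scan may read, even when lazy short-circuiting lets A return on some of them).
def Pre_player_situation_detect (x : Int) (y : Int) (observation : List (List (List Int))) : Prop :=
  ∀ ox ∈ ([-3, -2, -1, 0, 1, 2] : List Int), ∀ oy ∈ ([-3, -2, -1, 0, 1, 2] : List Int),
    (0 ≤ x + ox ∧ x + ox ≤ 8 ∧ 0 ≤ y + oy ∧ y + oy ≤ 8 ∧ ¬(ox = 0 ∧ oy = 0)) →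
      (PySem.List.pyGet? observation (x + ox)).isSome ∧
      ((PySem.List.pyGet? ((PySem.List.pyGet? observation (x + ox)).getD []) (y + oy))).isSome ∧
      3 ≤ (((PySem.List.pyGet? ((PySem.List.pyGet? observation (x + ox)).getD []) (y + oy))).getD []).length
instance (x : Int) (y : Int) (observation : List (List (List Int))) : Decidable (Pre_player_situation_detect x y observation) := by unfold Pre_player_situation_detect; infer_instance

def pvWitness_player_situation_detect : Int × Int × List (List (List Int)) :=
  (0, 0, [[[0, 0, 0], [0, 0, 0], [0, 0, 0]],
          [[0, 0, 0], [0, 0, 0], [0, 0, 0]],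
          [[0, 0, 0], [0, 0, 0], [0, 0, 0]]])

def Spec_player_situation_detect (x : Int) (y : Int) (observation : List (List (List Int))) (out : Int × Int) : Prop := out = player_situation_detect_alt x y observation
instance (x : Int) (y : Int) (observation : List (List (List Int))) (out : Int × Int) : Decidable (Spec_player_situation_detect x y observation out) := by unfold Spec_player_situation_detect; infer_instance

-- ===== CLAIM =====
def Claim_equal_player_situation_detect : Prop := ∀ (x : Int) (y : Int) (observation : List (List (List Int))), Dom_player_situation_detect x y observation → Pre_player_situation_detect x y observation → Spec_player_situation_detect x y observation (player_situation_detect x y observation)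

-- ===== LEMMAS AND PROOFS =====

-- the in-board test, as a Boolean predicate on an offset pair, and its two factors
def pvPx (x : Int) (a : Int) : Bool := decide (0 ≤ x + a ∧ x + a ≤ 8)
def pvInb (x y : Int) (o : Int × Int) : Bool :=
  decide (0 ≤ x + o.1 ∧ x + o.1 ≤ 8 ∧ 0 ≤ y + o.2 ∧ y + o.2 ≤ 8)

-- the 36 window offsets, flattened
def pvOffs : List (Int × Int) :=
  (PySem.List.pyRange (-3) 3 1).flatMap (fun a => (PySem.List.pyRange (-3) 3 1).map (fun b => (a, b)))

theorem pvFoldNest {σ : Type} (l1 l2 : List Int) (f : σ → Int → Int → σ) (s : σ) :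
    l1.foldl (fun s a => l2.foldl (fun s b => f s a b) s) s
      = (l1.flatMap (fun a => l2.map (fun b => (a, b)))).foldl (fun s o => f s o.1 o.2) s := by
  induction l1 generalizing s with
  | nil => rfl
  | cons a t ih => simp [List.flatMap_cons, List.foldl_append, List.foldl_map, ih]

theorem pvFoldNestOffs {σ : Type} (f : σ → Int → Int → σ) (s : σ) :
    (PySem.List.pyRange (-3) 3 1).foldl
        (fun s a => (PySem.List.pyRange (-3) 3 1).foldl (fun s b => f s a b) s) s
      = pvOffs.foldl (fun s o => f s o.1 o.2) s :=
  pvFoldNest _ _ f s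

theorem pvOffs_length : pvOffs.length = 36 := by decide

-- A's first-loop step is B's step on the shifted coordinates, guarded by the bounds test
theorem pvStepA1_eq (x y : Int) (observation : List (List (List Int)))
    (s : Int × Int × Int × Int) (ox oy : Int) :
    pvStepA1 x y observation s ox oy =
      if pvInb x y (ox, oy) then pvStepB x y observation s (x + ox) (y + oy) else s := by
  unfold pvStepA1 pvStepB pvInb
  by_cases hb : 0 ≤ x + ox ∧ x + ox ≤ 8 ∧ 0 ≤ y + oy ∧ y + oy ≤ 8
  · simp only [if_pos hb, decide_eq_true hb, if_true]
    have hc : (x + ox = x ∧ y + oy = y) ↔ (0 = ox ∧ 0 = oy) := by omega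
    by_cases h0 : 0 = ox ∧ 0 = oy
    · obtain ⟨h1, h2⟩ := h0
      rw [← h1, ← h2]
      simp
    · simp only [if_pos h0, if_neg (hc.not.mpr h0)]
      simp [show x + ox - x = ox from by ring, show y + oy - y = oy from by ring]
  · simp [hb]

-- filter of a cartesian-product list by a product predicate
theorem pvFilterProd (l1 l2 : List Int) (p q : Int → Bool) :
    (l1.flatMap (fun a => l2.map (fun b => (a, b)))).filter (fun o => p o.1 && q o.2)
      = (l1.filter p).flatMap (fun a => (l2.filter q).map (fun b => (a, b))) := by
  induction l1 with
  | nil => rfl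
  | cons a t ih =>
    by_cases h : p a <;>
      simp [List.filter_append, List.filter_map, Function.comp_def, h, ih]

-- shifting an int range
theorem pvShiftRange (x a b : Int) :
    (PySem.List.pyRange a b 1).map (fun k => x + k) = PySem.List.pyRange (x + a) (x + b) 1 := by
  rw [PySem.List.pyRange_one, PySem.List.pyRange_one, List.map_map,
    show x + b - (x + a) = b - a from by ring]
  exact List.map_congr_left (fun k _ => by simp [Function.comp]; ring)

-- filtering an int range by a closed interval
theorem pvFilterRange (n : ℕ) : ∀ (a b c d : Int), (b - a).toNat = n →
    (PySem.List.pyRange a b 1).filter (fun k => decide (c ≤ k ∧ k ≤ d))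
      = PySem.List.pyRange (max a c) (min b (d + 1)) 1 := by
  induction n with
  | zero =>
    intro a b c d h
    rw [PySem.List.pyRange_one_eq_nil (by omega), PySem.List.pyRange_one_eq_nil (by omega)]
    rfl
  | succ n ih =>
    intro a b c d h
    have hab : a < b := by omega
    rw [PySem.List.pyRange_one_cons hab, List.filter_cons, ih (a + 1) b c d (by omega)]
    by_cases hin : c ≤ a ∧ a ≤ d
    · rw [if_pos (by simpa using hin)]
      rw [show max (a + 1) c = a + 1 from by omega, show max a c = a from by omega,
        show PySem.List.pyRange a (min b (d + 1)) 1
            = a :: PySem.List.pyRange (a + 1) (min b (d + 1)) 1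
          from PySem.List.pyRange_one_cons (by omega)]
    · rw [if_neg (by simpa using hin)]
      rcases not_and_or.mp hin with hc | hd
      · congr 1 <;> omega
      · rw [PySem.List.pyRange_one_eq_nil (by omega), PySem.List.pyRange_one_eq_nil (by omega)]

theorem pvFoldlIfConst {α : Type} (p : α → Bool) (g : Int × Int → Int × Int) (c1 c2 : Int)
    (hg : ∀ t, g t = (t.1 + c1, t.2 + c2)) :
    ∀ (l : List α) (a b : Int),
      l.foldl (fun t o => if p o then g t else t) (a, b)
        = (a + c1 * (l.countP p : Int), b + c2 * (l.countP p : Int)) := by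
  intro l
  induction l with
  | nil => intro a b; simp
  | cons o t ih =>
    intro a b
    rw [List.foldl_cons]
    by_cases h : p o = true
    · rw [show (if p o = true then g ((a : Int), (b : Int)) else (a, b))
          = (a + c1, b + c2) from by simp [h, hg]]
      rw [ih]
      simp only [List.countP_cons, h, if_true, Prod.mk.injEq]
      constructor <;> (push_cast; ring)
    · rw [show (if p o = true then g ((a : Int), (b : Int)) else (a, b))
          = (a, b) from by simp [h]]
      rw [ih]
      simp [h]

theorem pvCountP_not {α : Type} (p : α → Bool) (l : List α) :
    l.countP (fun a => !p a) + l.countP p = l.length := by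
  induction l with
  | nil => rfl
  | cons o t ih => by_cases h : p o <;> simp [h] <;> omega

theorem pvStepA2_eq_gt (x y ca ce : Int) (h : ca > ce) :
    (fun (t : Int × Int) (o : Int × Int) => pvStepA2 x y ca ce t o.1 o.2)
      = (fun t o => if (!pvInb x y o) then (fun (t : Int × Int) => (t.1 + 25, t.2)) t else t) := by
  funext t o
  unfold pvStepA2 pvInb
  by_cases hb : 0 ≤ x + o.1 ∧ x + o.1 ≤ 8 ∧ 0 ≤ y + o.2 ∧ y + o.2 ≤ 8
  · simp [hb]
  · simp [hb, h]

theorem pvStepA2_eq_lt (x y ca ce : Int) (h : ca < ce) :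
    (fun (t : Int × Int) (o : Int × Int) => pvStepA2 x y ca ce t o.1 o.2)
      = (fun t o => if (!pvInb x y o) then (fun (t : Int × Int) => (t.1, t.2 - 20)) t else t) := by
  funext t o
  unfold pvStepA2 pvInb
  by_cases hb : 0 ≤ x + o.1 ∧ x + o.1 ≤ 8 ∧ 0 ≤ y + o.2 ∧ y + o.2 ≤ 8
  · simp [hb]
  · simp [hb, h, not_lt_of_gt h]

theorem pvStepA2_eq_eq (x y ca ce : Int) (h1 : ¬ ca > ce) (h2 : ¬ ca < ce) :
    (fun (t : Int × Int) (o : Int × Int) => pvStepA2 x y ca ce t o.1 o.2)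
      = (fun t o => if (!pvInb x y o) then (fun (t : Int × Int) => t) t else t) := by
  funext t o
  unfold pvStepA2 pvInb
  by_cases hb : 0 ≤ x + o.1 ∧ x + o.1 ≤ 8 ∧ 0 ≤ y + o.2 ∧ y + o.2 ≤ 8
  · simp [hb]
  · simp [hb, h1, h2]


-- pvInb is the product of its two per-axis factors
theorem pvInb_prod (x y : Int) : pvInb x y = fun o => pvPx x o.1 && pvPx y o.2 := by
  funext o
  rcases o with ⟨a, b⟩
  rw [Bool.eq_iff_iff]
  simp only [pvInb, pvPx, Bool.and_eq_true, decide_eq_true_eq]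
  tauto

-- the in-board offsets, shifted, are exactly B's clipped range (per axis)
theorem pvAxis (x : Int) :
    ((PySem.List.pyRange (-3) 3 1).filter (pvPx x)).map (fun k => x + k)
      = PySem.List.pyRange (max 0 (x - 3)) (min 8 (x + 2) + 1) 1 := by
  have hf : ((PySem.List.pyRange (-3) 3 1).filter (pvPx x))
      = (PySem.List.pyRange (-3) 3 1).filter (fun k => decide (-x ≤ k ∧ k ≤ 8 - x)) := by
    refine List.filter_congr (fun k _ => ?_)
    simp only [pvPx, decide_eq_decide]
    omega
  rw [hf, pvFilterRange 6 (-3) 3 (-x) (8 - x) (by decide), pvShiftRange]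
  congr 1 <;> omega

-- A's first loop equals B's loop over the clipped rectangle
theorem pvLoop1 (x y : Int) (observation : List (List (List Int))) :
    (PySem.List.pyRange (-3) 3 1).foldl (fun s ox =>
      (PySem.List.pyRange (-3) 3 1).foldl (fun s oy => pvStepA1 x y observation s ox oy) s)
      ((10 : Int), (0 : Int), (0 : Int), (0 : Int))
    = (PySem.List.pyRange (max 0 (x - 3)) (min 8 (x + 2) + 1) 1).foldl (fun s i =>
        (PySem.List.pyRange (max 0 (y - 3)) (min 8 (y + 2) + 1) 1).foldl
          (fun s j => pvStepB x y observation s i j) s)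
      ((10 : Int), (0 : Int), (0 : Int), (0 : Int)) := by
  rw [pvFoldNest]
  have h1 : (fun (s : Int × Int × Int × Int) (o : Int × Int) => pvStepA1 x y observation s o.1 o.2)
      = fun s o => if pvInb x y o then pvStepB x y observation s (x + o.1) (y + o.2) else s := by
    funext s o
    rw [pvStepA1_eq]
  rw [h1, ← List.foldl_filter, pvInb_prod, pvFilterProd]
  refine Eq.trans ((pvFoldNest _ _ (fun s a b => pvStepB x y observation s (x + a) (y + b))
    ((10 : Int), (0 : Int), (0 : Int), (0 : Int))).symm) ?_
  rw [← pvAxis x, ← pvAxis y]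
  simp only [List.foldl_map]

-- the number of in-board offsets is the clipped rectangle's area
theorem pvCount (x y : Int) :
    (pvOffs.countP (pvInb x y) : Int)
      = max 0 (min 8 (x + 2) - max 0 (x - 3) + 1) * max 0 (min 8 (y + 2) - max 0 (y - 3) + 1) := by
  have hlen : ∀ z : Int, (((PySem.List.pyRange (-3) 3 1).filter (pvPx z)).length : Int)
      = max 0 (min 8 (z + 2) - max 0 (z - 3) + 1) := by
    intro z
    have := congrArg List.length (pvAxis z)
    rw [List.length_map, PySem.List.length_pyRange_one] at this
    omega
  rw [List.countP_eq_length_filter, pvInb_prod]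
  unfold pvOffs
  rw [pvFilterProd, List.length_flatMap]
  simp only [List.length_map]
  rw [List.map_const', List.sum_replicate, smul_eq_mul]
  push_cast
  rw [hlen x, hlen y]

-- ===== VERDICT =====
theorem player_situation_detect_spec : Claim_equal_player_situation_detect := by
  intro x y observation _hDom _hPre
  unfold Spec_player_situation_detect player_situation_detect player_situation_detect_alt
  dsimp only
  rw [pvLoop1]
  rcases hS : (PySem.List.pyRange (max 0 (x - 3)) (min 8 (x + 2) + 1) 1).foldl (fun s i =>
      (PySem.List.pyRange (max 0 (y - 3)) (min 8 (y + 2) + 1) 1).foldl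
        (fun s j => pvStepB x y observation s i j) s)
      ((10 : Int), (0 : Int), (0 : Int), (0 : Int)) with ⟨atk, dfs, ca, ce⟩
  simp only
  rw [pvFoldNestOffs (pvStepA2 x y ca ce)]
  have harea : (36 : Int) - max 0 (min 8 (x + 2) - max 0 (x - 3) + 1) * max 0 (min 8 (y + 2) - max 0 (y - 3) + 1)
      = (pvOffs.countP fun o => !pvInb x y o : Nat) := by
    have h1 := pvCount x y
    have h2 := pvCountP_not (pvInb x y) pvOffs
    rw [pvOffs_length] at h2
    omega
  by_cases hgt : ca > ce
  · rw [pvStepA2_eq_gt x y ca ce hgt,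
      pvFoldlIfConst (fun o => !pvInb x y o) _ 25 0 (fun t => by simp) pvOffs,
      if_pos hgt, ← harea]
    simp only [Prod.mk.injEq]
    constructor <;> first | trivial | ring
  · by_cases hlt : ca < ce
    · rw [pvStepA2_eq_lt x y ca ce hlt,
        pvFoldlIfConst (fun o => !pvInb x y o) _ 0 (-20) (fun t => by simp [sub_eq_add_neg]) pvOffs,
        if_neg hgt, if_pos hlt, ← harea]
      simp only [Prod.mk.injEq]
      constructor <;> first | trivial | ring
    · rw [pvStepA2_eq_eq x y ca ce hgt hlt,
        pvFoldlIfConst (fun o => !pvInb x y o) _ 0 0 (fun t => by simp) pvOffs,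
        if_neg hgt, if_neg hlt]
      simp
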